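-- pv_equiv track=rewrite | github.com/kdabu00/Scheduler | FitnessChecker.py | check_acc
-- ===== SOURCE A (Python) =====
-- def check_acc(scheduled_experiments: set, exp_acc: dict) -> object:
--     """Checks the # of Accelerator Areas scheduled"""
--     num_acc = {'LEBT': 0, 'MEBT': 0, 'SEBT': 0}
--     for i in scheduled_experiments:
--         if i in exp_acc:
--             if exp_acc[i][2] == 'LEBT':
--                 num_acc['LEBT'] += 1
--             elif exp_acc[i][2] == 'MEBT':
--                 num_acc['MEBT'] += 1
--             else:
--                 num_acc['SEBT'] += 1
--     return num_acc
-- ===== SOURCE B (Python) =====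
-- def check_acc(scheduled_experiments: set, exp_acc: dict) -> object:
--     """Checks the # of Accelerator Areas scheduled"""
--     lebt = sum(1 for k, v in exp_acc.items()
--                if k in scheduled_experiments and v[2] == 'LEBT')
--     mebt = sum(1 for k, v in exp_acc.items()
--                if k in scheduled_experiments and v[2] == 'MEBT')
--     scheduled = sum(1 for k in exp_acc if k in scheduled_experiments)
--     return {'LEBT': lebt, 'MEBT': mebt, 'SEBT': scheduled - lebt - mebt}
-- ===== Notes on version B (the rewrite author's own statement) =====
-- stated objective: alternative
-- what changed: B inverts the traversal: instead of A's single branchy loop over the scheduled set with dict lookups and in-place counter updates, it makes staged sum-of-generator passes over the dict's items testing set membership, and obtains the SEBT catch-all by subtracting the two named counts from the number of scheduled entries found in the dict.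
import Mathlib
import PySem

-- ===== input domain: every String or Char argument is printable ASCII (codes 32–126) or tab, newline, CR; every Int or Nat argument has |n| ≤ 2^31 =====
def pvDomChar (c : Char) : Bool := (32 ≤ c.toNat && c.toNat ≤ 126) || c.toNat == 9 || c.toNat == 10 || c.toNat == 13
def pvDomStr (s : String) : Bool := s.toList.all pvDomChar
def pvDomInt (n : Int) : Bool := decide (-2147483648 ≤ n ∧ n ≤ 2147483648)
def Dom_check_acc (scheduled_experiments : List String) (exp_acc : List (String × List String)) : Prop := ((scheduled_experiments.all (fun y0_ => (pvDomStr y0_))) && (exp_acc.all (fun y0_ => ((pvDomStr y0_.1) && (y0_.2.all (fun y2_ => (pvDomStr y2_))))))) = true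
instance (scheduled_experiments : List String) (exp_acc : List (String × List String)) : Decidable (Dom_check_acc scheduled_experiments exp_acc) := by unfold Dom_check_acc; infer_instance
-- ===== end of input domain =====

-- B inverts the traversal: staged counting passes over the dict's items testing set
-- membership, with the SEBT catch-all obtained by subtraction (objective: alternative).


-- ===== PORT A =====
-- the loop body of A: 'if i in exp_acc: … exp_acc[i][2] …'; the inner 'none' arm is
-- Python's IndexError on exp_acc[i][2] (excluded by Pre_)
def check_acc_step (d : PySem.Dict String (List String))
    (acc : PySem.Dict String Int) (i : String) : PySem.Dict String Int :=
  match d.get? i with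
  | none => acc
  | some v =>
    match PySem.List.pyGet? v 2 with
    | none => acc
    | some a =>
      if a = "LEBT" then acc.modify "LEBT" 0 (· + 1)
      else if a = "MEBT" then acc.modify "MEBT" 0 (· + 1)
      else acc.modify "SEBT" 0 (· + 1)

def check_acc (scheduled_experiments : List String) (exp_acc : List (String × List String)) : List (String × Int) :=
  let d := PySem.Dict.mk exp_acc
  (scheduled_experiments.foldl (check_acc_step d)
    (PySem.Dict.mk [("LEBT", 0), ("MEBT", 0), ("SEBT", 0)])).items

-- ===== PORT B =====
-- B iterates exp_acc.items() (three staged generator sums) testing membership in the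
-- scheduled set; 'v[2] == …' is pyGet? v 2 == some … (the none arm is the IndexError
-- excluded by Pre_); SEBT is by subtraction.
def check_acc_alt (scheduled_experiments : List String) (exp_acc : List (String × List String)) : List (String × Int) :=
  let items := (PySem.Dict.mk exp_acc).items
  let lebt : Int :=
    (items.countP (fun kv => scheduled_experiments.contains kv.1
        && (PySem.List.pyGet? kv.2 2 == some "LEBT")) : Nat)
  let mebt : Int :=
    (items.countP (fun kv => scheduled_experiments.contains kv.1
        && (PySem.List.pyGet? kv.2 2 == some "MEBT")) : Nat)
  let scheduled : Int :=
    (items.countP (fun kv => scheduled_experiments.contains kv.1) : Nat)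
  [("LEBT", lebt), ("MEBT", mebt), ("SEBT", scheduled - lebt - mebt)]

-- ===== PRECONDITION & SPEC =====
-- Pre_ excludes (a) inputs where Python raises IndexError: a scheduled experiment found in
-- exp_acc whose value list has fewer than 3 entries (exp_acc[i][2] raises in A and B alike),
-- and (b) encodings a Python input cannot have: scheduled_experiments is a Python SET and
-- exp_acc a DICT, so their list encodings have distinct elements / distinct keys.
def Pre_check_acc (scheduled_experiments : List String) (exp_acc : List (String × List String)) : Prop :=
  (scheduled_experiments.all (fun i =>
    (((PySem.Dict.mk exp_acc).get? i).map (fun v => decide (3 ≤ v.length))).getD true)) = true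
  ∧ scheduled_experiments.Nodup ∧ (exp_acc.map Prod.fst).Nodup
instance (scheduled_experiments : List String) (exp_acc : List (String × List String)) : Decidable (Pre_check_acc scheduled_experiments exp_acc) := by unfold Pre_check_acc; infer_instance

def pvWitness_check_acc : List String × (List (String × List String)) :=
  (["e1", "e2", "e9"], [("e1", ["a", "b", "LEBT"]), ("e2", ["a", "b", "SUP"])])

def Spec_check_acc (scheduled_experiments : List String) (exp_acc : List (String × List String)) (out : List (String × Int)) : Prop := out = check_acc_alt scheduled_experiments exp_acc
instance (scheduled_experiments : List String) (exp_acc : List (String × List String)) (out : List (String × Int)) : Decidable (Spec_check_acc scheduled_experiments exp_acc out) := by unfold Spec_check_acc; infer_instance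

-- ===== CLAIM (what is proved, stated in full; the proofs are below) =====
def Claim_equal_check_acc : Prop := ∀ (scheduled_experiments : List String) (exp_acc : List (String × List String)), Dom_check_acc scheduled_experiments exp_acc → Pre_check_acc scheduled_experiments exp_acc → Spec_check_acc scheduled_experiments exp_acc (check_acc scheduled_experiments exp_acc)

-- ===== LEMMAS AND PROOFS =====

-- counting the catch-all: length minus the two named counts is the countP of "neither"
lemma length_sub_counts (areas : List String) :
    (areas.length : Int) - areas.count "LEBT" - areas.count "MEBT"
      = areas.countP (fun a => !(a == "LEBT") && !(a == "MEBT")) := by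
  induction areas with
  | nil => simp
  | cons a t ih =>
    simp only [List.length_cons, List.count_cons, List.countP_cons]
    by_cases hL : a = "LEBT" <;> by_cases hM : a = "MEBT" <;>
      simp [hL, hM] at * <;> omega

-- the loop invariant of A: folding A's step over sched from a literal counter dict adds the
-- three counts of the collected area list to the three stored values
lemma loop_eq (d : PySem.Dict String (List String)) (sched : List String)
    (h : ∀ i ∈ sched, ∀ v, d.get? i = some v → 3 ≤ v.length)
    (l m s : Int) :
    sched.foldl (check_acc_step d) (PySem.Dict.mk [("LEBT", l), ("MEBT", m), ("SEBT", s)])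
      = PySem.Dict.mk [("LEBT", l + ((sched.filterMap (fun i => (d.get? i).bind (fun v => PySem.List.pyGet? v 2))).count "LEBT" : Int)),
          ("MEBT", m + ((sched.filterMap (fun i => (d.get? i).bind (fun v => PySem.List.pyGet? v 2))).count "MEBT" : Int)),
          ("SEBT", s + ((sched.filterMap (fun i => (d.get? i).bind (fun v => PySem.List.pyGet? v 2))).countP (fun a => !(a == "LEBT") && !(a == "MEBT")) : Int))] := by
  induction sched generalizing l m s with
  | nil => simp
  | cons i t ih =>
    have hi := h i (List.mem_cons_self ..)
    have ht : ∀ j ∈ t, ∀ v, d.get? j = some v → 3 ≤ v.length :=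
      fun j hj => h j (List.mem_cons_of_mem _ hj)
    simp only [List.foldl_cons, List.filterMap_cons]
    cases hg : d.get? i with
    | none => simp [check_acc_step, hg, ih ht]
    | some v =>
      obtain ⟨a0, a1, a2, rest, rfl⟩ : ∃ a0 a1 a2 rest, v = a0 :: a1 :: a2 :: rest := by
        match v, hi v hg with
        | a0 :: a1 :: a2 :: rest, _ => exact ⟨a0, a1, a2, rest, rfl⟩
      have hsome : PySem.List.pyGet? (a0 :: a1 :: a2 :: rest) 2 = some a2 := by
        simp [PySem.List.pyGet?, PySem.List.pyIdx?]
        rw [if_pos (by omega)]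
        rfl
      simp only [check_acc_step, hg, hsome, Option.bind_some]
      by_cases hL : a2 = "LEBT"
      · rw [if_pos hL,
          show (PySem.Dict.mk [("LEBT", l), ("MEBT", m), ("SEBT", s)]).modify "LEBT" 0 (· + 1)
            = PySem.Dict.mk [("LEBT", l + 1), ("MEBT", m), ("SEBT", s)] by
            simp [PySem.Dict.modify, PySem.Dict.get?, PySem.Dict.getD, PySem.Dict.insert],
          ih ht]
        simp [hL]
        omega
      · by_cases hM : a2 = "MEBT"
        · rw [if_neg hL, if_pos hM,
            show (PySem.Dict.mk [("LEBT", l), ("MEBT", m), ("SEBT", s)]).modify "MEBT" 0 (· + 1)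
              = PySem.Dict.mk [("LEBT", l), ("MEBT", m + 1), ("SEBT", s)] by
              simp [PySem.Dict.modify, PySem.Dict.get?, PySem.Dict.getD, PySem.Dict.insert],
            ih ht]
          simp [hM]
          omega
        · rw [if_neg hL, if_neg hM,
            show (PySem.Dict.mk [("LEBT", l), ("MEBT", m), ("SEBT", s)]).modify "SEBT" 0 (· + 1)
              = PySem.Dict.mk [("LEBT", l), ("MEBT", m), ("SEBT", s + 1)] by
              simp [PySem.Dict.modify, PySem.Dict.get?, PySem.Dict.getD, PySem.Dict.insert],
            ih ht]
          simp [hL, hM]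
          omega

-- splitting B's membership test over a cons'd set element (i ∉ t keeps the two parts disjoint)
lemma countP_contains_cons (l : List (String × List String)) (i : String) (t : List String)
    (hit : i ∉ t) (p : String × List String → Bool) :
    l.countP (fun kv => (i :: t).contains kv.1 && p kv)
      = l.countP (fun kv => kv.1 == i && p kv) + l.countP (fun kv => t.contains kv.1 && p kv) := by
  induction l with
  | nil => simp
  | cons kv rest ih =>
    simp only [List.countP_cons, ih]
    by_cases h : kv.1 = i
    · by_cases hp : p kv = true <;> simp [h, hit, hp]
      omega
    · simp [h]
      omega

-- with distinct keys, counting the items whose key is i is testing the (unique) lookup at i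
lemma countP_key (l : List (String × List String)) (hn : (l.map Prod.fst).Nodup) (i : String)
    (p : String × List String → Bool) :
    l.countP (fun kv => kv.1 == i && p kv)
      = if (((PySem.Dict.mk l).get? i).map (fun v => p (i, v))).getD false then 1 else 0 := by
  induction l with
  | nil => simp [PySem.Dict.get?]
  | cons kv rest ih =>
    obtain ⟨k, v⟩ := kv
    simp only [List.map_cons, List.nodup_cons] at hn
    rw [List.countP_cons, PySem.Dict.get?_mk_cons]
    by_cases h : k = i
    · subst h
      have hz : rest.countP (fun kv => kv.1 == k && p kv) = 0 := by
        rw [List.countP_eq_zero]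
        intro kv hkv
        have : kv.1 ≠ k := fun e => hn.1 (e ▸ List.mem_map_of_mem hkv)
        simp [this]
      simp [hz]
    · have : (k == i) = false := by simp [h]
      simp [this, ih hn.2]

-- the cross-count: a countP over the dict's items filtered by set membership equals a countP
-- over the (duplicate-free) set of its lookup
lemma countP_contains_eq (sched : List String) (hs : sched.Nodup)
    (l : List (String × List String)) (hn : (l.map Prod.fst).Nodup)
    (p : String × List String → Bool) :
    l.countP (fun kv => sched.contains kv.1 && p kv)
      = sched.countP (fun i => (((PySem.Dict.mk l).get? i).map (fun v => p (i, v))).getD false) := by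
  induction sched with
  | nil => simp
  | cons i t ih =>
    rw [List.nodup_cons] at hs
    rw [countP_contains_cons l i t hs.1 p, countP_key l hn i p, List.countP_cons, ih hs.2]
    split <;> omega

-- ===== VERDICT (by name: the statement is the Claim_ definition above) =====
theorem check_acc_spec : Claim_equal_check_acc := by
  intro sched exp_acc _ hpre
  obtain ⟨hpre, hs, hk⟩ := hpre
  unfold Spec_check_acc check_acc check_acc_alt
  dsimp only
  have h : ∀ i ∈ sched, ∀ v, (PySem.Dict.mk exp_acc).get? i = some v → 3 ≤ v.length := by
    intro i hi v hv
    rw [List.all_eq_true] at hpre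
    have := hpre i hi
    simp [hv] at this
    exact this
  rw [loop_eq _ _ h 0 0 0]
  simp only [countP_contains_eq sched hs exp_acc hk (fun kv => PySem.List.pyGet? kv.2 2 == some "LEBT"),
    countP_contains_eq sched hs exp_acc hk (fun kv => PySem.List.pyGet? kv.2 2 == some "MEBT")]
  set d := PySem.Dict.mk exp_acc with hd
  have hL : ∀ (o : Option (List String)),
      ((o.bind (fun v => PySem.List.pyGet? v 2)) == some "LEBT")
        = ((o.map (fun v => PySem.List.pyGet? v 2 == some "LEBT")).getD false) := by
    intro o; cases o <;> simp
  have hM : ∀ (o : Option (List String)),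
      ((o.bind (fun v => PySem.List.pyGet? v 2)) == some "MEBT")
        = ((o.map (fun v => PySem.List.pyGet? v 2 == some "MEBT")).getD false) := by
    intro o; cases o <;> simp
  have hcl : (sched.filterMap (fun i => (d.get? i).bind (fun v => PySem.List.pyGet? v 2))).count "LEBT"
      = sched.countP (fun i => ((d.get? i).map (fun v => PySem.List.pyGet? v 2 == some "LEBT")).getD false) := by
    rw [List.count_filterMap]
    exact List.countP_congr (fun i _ => by rw [hL])
  have hcm : (sched.filterMap (fun i => (d.get? i).bind (fun v => PySem.List.pyGet? v 2))).count "MEBT"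
      = sched.countP (fun i => ((d.get? i).map (fun v => PySem.List.pyGet? v 2 == some "MEBT")).getD false) := by
    rw [List.count_filterMap]
    exact List.countP_congr (fun i _ => by rw [hM])
  have hlen : (sched.filterMap (fun i => (d.get? i).bind (fun v => PySem.List.pyGet? v 2))).length
      = sched.countP (fun i => ((d.get? i).map (fun _ => true)).getD false) := by
    rw [List.length_filterMap_eq_countP]
    refine List.countP_congr (fun i hi => ?_)
    cases hg : d.get? i with
    | none => simp
    | some v =>
      have h3 := h i hi v hg
      obtain ⟨a0, a1, a2, rest, rfl⟩ : ∃ a0 a1 a2 rest, v = a0 :: a1 :: a2 :: rest := by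
        match v, h3 with
        | a0 :: a1 :: a2 :: rest, _ => exact ⟨a0, a1, a2, rest, rfl⟩
      simp [PySem.List.pyGet?, PySem.List.pyIdx?]
  rw [← hcl, ← hcm]
  have h3 : (exp_acc.countP (fun kv => sched.contains kv.1))
      = sched.countP (fun i => ((d.get? i).map (fun _ => true)).getD false) := by
    rw [← countP_contains_eq sched hs exp_acc hk (fun _ => true)]
    exact List.countP_congr (fun kv _ => by simp)
  have hse := length_sub_counts (sched.filterMap (fun i => (d.get? i).bind (fun v => PySem.List.pyGet? v 2)))
  rw [h3, ← hlen, hse]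
  simp
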